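-- pv_equiv track=rewrite | github.com/PietrooDiSarno/area-coverage-planning-python | mosaic_algorithms/online_frontier_repair/checkTaboo.py | boustrophedonMod
-- ===== SOURCE A (Python) =====
-- def boustrophedonMod(grid, dir1, dir2):
--
--     #Previous check...
--     if dir1 in ['north', 'south']:
--         if dir2 not in ['east', 'west']:
--             raise ValueError("Sweeping direction is not well defined")
--     elif dir1 in ['east', 'west']:
--         if dir2 not in ['north', 'south']:
--             raise ValueError("Sweeping direction is not well defined")
--
--     # Pre-allocate variables
--     sweep = dir2 in ['east', 'south']
--     currdir1, currdir2 = dir1, dir2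
--
--     # Plan tour over the grid discretization
--     # The origin of the coverage path depends on the spacecraft ground track position
--     start = False
--     if dir1 in ['north', 'south']:  # Horizontal sweep
--
--         if sweep:
--             bearing = True # left -> right
--         else:
--             bearing = False # right -> left
--
--         for i in range(len(grid)):
--             # Sweep across latitude
--             if dir1 == 'south':
--                 irow = i
--             else:
--                 irow = len(grid) - i - 1
--             for j in range(len(grid[0])):
--                 if not bearing:
--                     icol = len(grid[0]) - j - 1
--                 else:
--                     icol = j
--                 if grid[irow][icol] is not None:
--                     start = True
--                     break
--             if start:
--                 break
--             bearing = not bearing  # Switch coverage direction after each row sweeping, i.e. left (highest lon) to right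
--             # (lowest lon) or vice versa
--
--
--     elif dir1 in ['east', 'west']:  # Vertical sweep
--
--         if sweep:
--             bearing = True  # top -> down
--         else:
--             bearing = False  # down -> top
--
--         for i in range(len(grid[0])):
--             # Sweep across longitude
--             if dir1 == 'west':
--                 icol = len(grid[0]) - i - 1
--             else:
--                 icol = i
--             for j in range(len(grid)):
--                 if bearing:
--                     irow = j
--                 else:
--                     irow = len(grid) - j - 1
--                 if grid[irow][icol] is not None:
--                     start = True
--                     break
--             if start:
--                 break
--             bearing = not bearing  # Switch coverage direction after each row sweeping, i.e. left (highest lon) to right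
--             # (lowest lon) or vice versa
--
--     # Adjust direction after sweeping
--     if bearing:
--         if dir2 == 'west':
--             currdir2 = 'east'
--         elif dir2 == 'north':
--             currdir2 = 'south'
--     else:
--         if dir2 == 'east':
--             currdir2 = 'west'
--         elif dir2 == 'south':
--             currdir2 = 'north'
--
--     return currdir1, currdir2
-- ===== SOURCE B (Python) =====
-- def boustrophedonMod(grid, dir1, dir2):
--     # Exhaustive validation (B raises ValueError on any invalid direction pair)
--     if dir1 in ['north', 'south']:
--         if dir2 not in ['east', 'west']:
--             raise ValueError("Sweeping direction is not well defined")
--     elif dir1 in ['east', 'west']: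
--         if dir2 not in ['north', 'south']:
--             raise ValueError("Sweeping direction is not well defined")
--     else:
--         raise ValueError("Sweeping direction is not well defined")
--
--     sweep = dir2 in ['east', 'south']
--     nrows = len(grid)
--     ncols = len(grid[0]) if grid else 0
--
--     # Direction-independent occupancy bounding box: collect every occupied cell
--     # of the scanned rectangle once (row-major, no early exit), then read the
--     # number of skipped empty lines off the relevant edge of the box.
--     cells = [(r, c) for r in range(nrows) for c in range(ncols)
--              if grid[r][c] is not None]
--
--     if not cells:
--         skip = nrows if dir1 in ['north', 'south'] else ncols
--     elif dir1 == 'south':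
--         skip = min(r for r, _ in cells)
--     elif dir1 == 'north':
--         skip = nrows - 1 - max(r for r, _ in cells)
--     elif dir1 == 'east':
--         skip = min(c for _, c in cells)
--     else:  # 'west'
--         skip = ncols - 1 - max(c for _, c in cells)
--
--     bearing = sweep == (skip % 2 == 0)
--
--     currdir2 = dir2
--     if bearing:
--         if dir2 == 'west':
--             currdir2 = 'east'
--         elif dir2 == 'north':
--             currdir2 = 'south'
--     else:
--         if dir2 == 'east':
--             currdir2 = 'west'
--         elif dir2 == 'south':
--             currdir2 = 'north'
--     return dir1, currdir2
-- ===== Notes on version B (the rewrite author's own statement) =====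
-- stated objective: alternative
-- what changed: Instead of A's direction-dependent ordered scan with an alternating bearing flag and early exit, B makes one direction-independent row-major pass collecting all occupied cells (the occupancy bounding box) and reads the number of skipped empty lines off the box edge (min/max row or column), deriving the bearing from its parity; Pre_ excludes invalid direction pairs and empty/ragged grids, on which A raises or B's full-rectangle pass raises where A's early exit returned.
-- outside the precondition, e.g. on boustrophedonMod([[None, 1], [0]], 'south', 'west'): A returns ('south', 'west'), B raises IndexError
import Mathlib
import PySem

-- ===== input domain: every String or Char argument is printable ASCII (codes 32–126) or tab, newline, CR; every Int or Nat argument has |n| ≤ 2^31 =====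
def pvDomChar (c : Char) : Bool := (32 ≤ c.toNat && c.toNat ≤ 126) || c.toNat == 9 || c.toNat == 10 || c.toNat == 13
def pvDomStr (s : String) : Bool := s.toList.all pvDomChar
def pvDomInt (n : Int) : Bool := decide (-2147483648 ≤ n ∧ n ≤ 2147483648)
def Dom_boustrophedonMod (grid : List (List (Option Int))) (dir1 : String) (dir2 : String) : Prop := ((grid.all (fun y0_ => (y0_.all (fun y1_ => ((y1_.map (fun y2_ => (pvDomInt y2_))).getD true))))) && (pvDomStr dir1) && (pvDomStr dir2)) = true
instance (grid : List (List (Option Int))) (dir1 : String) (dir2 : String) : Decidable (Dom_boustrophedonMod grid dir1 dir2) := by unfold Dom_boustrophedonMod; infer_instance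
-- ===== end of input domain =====

-- B replaces A's direction-dependent ordered scan (alternating bearing flag, early exit)
-- by one direction-independent row-major pass collecting the occupied cells and reading
-- the skipped-line count off the occupancy bounding box (objective: alternative).


-- ===== PORT A =====

-- len(grid[0]) (only evaluated where Python evaluates it; empty grid excluded by Pre_ there)
def pvW (grid : List (List (Option Int))) : Nat := (grid.headD []).length

-- grid[r][c]; a Python IndexError (excluded by Pre_) is folded to none here
def pvCell (grid : List (List (Option Int))) (r c : Int) : Option Int :=
  match PySem.List.pyGet? grid r with
  | none => none
  | some row => (PySem.List.pyGet? row c).getD none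

-- inner `for j in range(len(grid[0]))` loop of the horizontal branch (break-on-found = any)
def aRowScan (grid : List (List (Option Int))) (irow : Int) (bearing : Bool) : Bool :=
  (List.range (pvW grid)).any (fun (j : Nat) =>
    let icol : Int := if bearing then (j : Int) else (pvW grid : Int) - (j : Int) - 1
    (pvCell grid irow icol).isSome)

-- inner `for j in range(len(grid))` loop of the vertical branch
def aColScan (grid : List (List (Option Int))) (icol : Int) (bearing : Bool) : Bool :=
  (List.range grid.length).any (fun (j : Nat) =>
    let irow : Int := if bearing then (j : Int) else ((grid.length : Int) - (j : Int) - 1)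
    (pvCell grid irow icol).isSome)

-- outer `for i in range(len(grid))` loop; returns the bearing at loop exit
def aLoopH (grid : List (List (Option Int))) (dir1 : String) : List Nat → Bool → Bool
  | [], b => b
  | i :: rest, b =>
    let irow : Int := if dir1 = "south" then (i : Int) else ((grid.length : Int) - (i : Int) - 1)
    if aRowScan grid irow b then b else aLoopH grid dir1 rest (!b)

-- outer `for i in range(len(grid[0]))` loop of the vertical branch
def aLoopV (grid : List (List (Option Int))) (dir1 : String) : List Nat → Bool → Bool
  | [], b => b
  | i :: rest, b =>
    let icol : Int := if dir1 = "west" then (pvW grid : Int) - (i : Int) - 1 else (i : Int)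
    if aColScan grid icol b then b else aLoopV grid dir1 rest (!b)

def boustrophedonMod (grid : List (List (Option Int))) (dir1 : String) (dir2 : String) : String × String :=
  let sweep := decide (dir2 = "east" ∨ dir2 = "south")
  let bearing :=
    if dir1 = "north" ∨ dir1 = "south" then
      aLoopH grid dir1 (List.range grid.length) sweep
    else if dir1 = "east" ∨ dir1 = "west" then
      aLoopV grid dir1 (List.range (pvW grid)) sweep
    else sweep  -- Python: NameError (bearing unbound); excluded by Pre_
  let currdir2 :=
    if bearing then
      if dir2 = "west" then "east" else if dir2 = "north" then "south" else dir2
    else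
      if dir2 = "east" then "west" else if dir2 = "south" then "north" else dir2
  (dir1, currdir2)

-- ===== PORT B =====

-- B's exhaustive validation (a failed check raises ValueError in Python; excluded by Pre_)
def bValid (dir1 dir2 : String) : Bool :=
  if dir1 = "north" ∨ dir1 = "south" then decide (dir2 = "east" ∨ dir2 = "west")
  else if dir1 = "east" ∨ dir1 = "west" then decide (dir2 = "north" ∨ dir2 = "south")
  else false

-- [(r, c) for r in range(nrows) for c in range(ncols) if grid[r][c] is not None]
def bCells (grid : List (List (Option Int))) (nrows ncols : Nat) : List (Nat × Nat) :=
  (List.range nrows).flatMap (fun r =>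
    ((List.range ncols).filter (fun c => (pvCell grid (Int.ofNat r) (Int.ofNat c)).isSome)).map
      (fun c => (r, c)))

def boustrophedonMod_alt (grid : List (List (Option Int))) (dir1 : String) (dir2 : String) : String × String :=
  if !(bValid dir1 dir2) then (dir1, dir2)  -- Python B raises ValueError; excluded by Pre_
  else
    let sweep := decide (dir2 = "east" ∨ dir2 = "south")
    let nrows := grid.length
    let ncols := pvW grid  -- len(grid[0]) if grid else 0
    let cells := bCells grid nrows ncols
    let skip : Nat :=
      if cells.isEmpty then (if dir1 = "north" ∨ dir1 = "south" then nrows else ncols)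
      else if dir1 = "south" then (PySem.List.min? (cells.map Prod.fst) (fun x => x)).getD 0
      else if dir1 = "north" then nrows - 1 - (PySem.List.max? (cells.map Prod.fst) (fun x => x)).getD 0
      else if dir1 = "east" then (PySem.List.min? (cells.map Prod.snd) (fun x => x)).getD 0
      else ncols - 1 - (PySem.List.max? (cells.map Prod.snd) (fun x => x)).getD 0
    let bearing := sweep == decide (skip % 2 = 0)
    let currdir2 :=
      if bearing then
        if dir2 = "west" then "east" else if dir2 = "north" then "south" else dir2
      else
        if dir2 = "east" then "west" else if dir2 = "south" then "north" else dir2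
    (dir1, currdir2)

-- ===== PRECONDITION & SPEC =====

-- Pre_ excludes: invalid direction pairs (A raises ValueError or NameError, B ValueError),
-- an empty grid in the east/west branch (A: IndexError on len(grid[0])), and ragged grids
-- with a row shorter than the first row, on which A's cell scan raises IndexError or returns
-- depending on scan direction and B's full-rectangle pass raises IndexError.
def Pre_boustrophedonMod (grid : List (List (Option Int))) (dir1 : String) (dir2 : String) : Prop :=
  (((dir1 = "north" ∨ dir1 = "south") ∧ (dir2 = "east" ∨ dir2 = "west")) ∨
   ((dir1 = "east" ∨ dir1 = "west") ∧ (dir2 = "north" ∨ dir2 = "south"))) ∧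
  ((dir1 = "east" ∨ dir1 = "west") → grid ≠ []) ∧
  (∀ row ∈ grid, pvW grid ≤ row.length)

instance (grid : List (List (Option Int))) (dir1 : String) (dir2 : String) : Decidable (Pre_boustrophedonMod grid dir1 dir2) := by
  unfold Pre_boustrophedonMod; infer_instance

def pvWitness_boustrophedonMod : List (List (Option Int)) × String × String :=
  ([[none, some 1], [some 2, none]], "south", "east")

def Spec_boustrophedonMod (grid : List (List (Option Int))) (dir1 : String) (dir2 : String) (out : String × String) : Prop :=
  out = boustrophedonMod_alt grid dir1 dir2

instance (grid : List (List (Option Int))) (dir1 : String) (dir2 : String) (out : String × String) : Decidable (Spec_boustrophedonMod grid dir1 dir2 out) := by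
  unfold Spec_boustrophedonMod; infer_instance

-- ===== CLAIM =====

def Claim_equal_boustrophedonMod : Prop :=
  ∀ (grid : List (List (Option Int))) (dir1 : String) (dir2 : String),
    Dom_boustrophedonMod grid dir1 dir2 → Pre_boustrophedonMod grid dir1 dir2 →
    Spec_boustrophedonMod grid dir1 dir2 (boustrophedonMod grid dir1 dir2)


-- ===== LEMMAS AND PROOFS =====

-- A's inner scan is just occupancy of the line (`any` is existence; the bearing only
-- mirrors the scanned indices)
def bRowOcc (grid : List (List (Option Int))) (r : Int) : Bool :=
  (List.range (pvW grid)).any (fun (k : Nat) => (pvCell grid r (k : Int)).isSome)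

def bColOcc (grid : List (List (Option Int))) (c : Int) : Bool :=
  (List.range grid.length).any (fun (r : Nat) => (pvCell grid (r : Int) c).isSome)

lemma aRowScan_eq (grid : List (List (Option Int))) (irow : Int) (b : Bool) :
    aRowScan grid irow b = bRowOcc grid irow := by
  cases b with
  | true => simp [aRowScan, bRowOcc]
  | false =>
    simp only [aRowScan, bRowOcc, Bool.false_eq_true, if_false]
    rw [Bool.eq_iff_iff]
    simp only [List.any_eq_true, List.mem_range]
    constructor
    · rintro ⟨j, hj, h⟩
      refine ⟨pvW grid - 1 - j, by omega, ?_⟩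
      have harg : ((pvW grid - 1 - j : Nat) : Int)
          = (pvW grid : Int) - (j : Int) - 1 := by omega
      rw [harg]; exact h
    · rintro ⟨j, hj, h⟩
      refine ⟨pvW grid - 1 - j, by omega, ?_⟩
      have harg : (pvW grid : Int) - ((pvW grid - 1 - j : Nat) : Int) - 1
          = (j : Int) := by omega
      rw [harg]; exact h

lemma aColScan_eq (grid : List (List (Option Int))) (icol : Int) (b : Bool) :
    aColScan grid icol b = bColOcc grid icol := by
  cases b with
  | true => simp [aColScan, bColOcc]
  | false =>
    simp only [aColScan, bColOcc, Bool.false_eq_true, if_false]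
    rw [Bool.eq_iff_iff]
    simp only [List.any_eq_true, List.mem_range]
    constructor
    · rintro ⟨j, hj, h⟩
      refine ⟨grid.length - 1 - j, by omega, ?_⟩
      have harg : ((grid.length - 1 - j : Nat) : Int) = (grid.length : Int) - (j : Int) - 1 := by
        omega
      rw [harg]; exact h
    · rintro ⟨j, hj, h⟩
      refine ⟨grid.length - 1 - j, by omega, ?_⟩
      have harg : (grid.length : Int) - ((grid.length - 1 - j : Nat) : Int) - 1 = (j : Int) := by
        omega
      rw [harg]; exact h

-- xor-parity step: flipping the accumulator once is flipping the index parity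
lemma xor_step (b : Bool) (m : Nat) :
    xor (!b) (decide (m % 2 = 1)) = xor b (decide ((m + 1) % 2 = 1)) := by
  rcases Nat.mod_two_eq_zero_or_one m with h | h <;>
    cases b <;> simp [h, Nat.add_mod]

-- A's flip-per-line loop equals "parity of the index of the first occupied line"
lemma aLoopH_eq (grid : List (List (Option Int))) (dir1 : String) :
    ∀ (ls : List Nat) (b : Bool),
      aLoopH grid dir1 ls b =
        xor b (decide (((ls.findIdx?
          (fun (i : Nat) => bRowOcc grid (if dir1 = "south" then (i : Int) else ((grid.length : Int) - (i : Int) - 1)))).getD ls.length) % 2 = 1))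
  | [], b => by simp [aLoopH]
  | i :: rest, b => by
    rw [aLoopH, aRowScan_eq, List.findIdx?_cons]
    by_cases h : bRowOcc grid (if dir1 = "south" then (i : Int) else ((grid.length : Int) - (i : Int) - 1)) = true
    · simp [h]
    · rw [if_neg h, if_neg h, aLoopH_eq grid dir1 rest (!b)]
      cases hf : rest.findIdx?
          (fun (i : Nat) => bRowOcc grid (if dir1 = "south" then (i : Int) else ((grid.length : Int) - (i : Int) - 1))) with
      | none => simpa [hf] using xor_step b rest.length
      | some k => simpa [hf] using xor_step b k

lemma aLoopV_eq (grid : List (List (Option Int))) (dir1 : String) :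
    ∀ (ls : List Nat) (b : Bool),
      aLoopV grid dir1 ls b =
        xor b (decide (((ls.findIdx?
          (fun (i : Nat) => bColOcc grid (if dir1 = "west" then (pvW grid : Int) - (i : Int) - 1 else (i : Int)))).getD ls.length) % 2 = 1))
  | [], b => by simp [aLoopV]
  | i :: rest, b => by
    rw [aLoopV, aColScan_eq, List.findIdx?_cons]
    by_cases h : bColOcc grid (if dir1 = "west" then (pvW grid : Int) - (i : Int) - 1 else (i : Int)) = true
    · simp [h]
    · rw [if_neg h, if_neg h, aLoopV_eq grid dir1 rest (!b)]
      cases hf : rest.findIdx?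
          (fun (i : Nat) => bColOcc grid (if dir1 = "west" then (pvW grid : Int) - (i : Int) - 1 else (i : Int))) with
      | none => simpa [hf] using xor_step b rest.length
      | some k => simpa [hf] using xor_step b k

lemma findIdx?_congr_mem {α : Type} (p q : α → Bool) :
    ∀ (l : List α), (∀ a ∈ l, p a = q a) → l.findIdx? p = l.findIdx? q
  | [], _ => rfl
  | a :: l, h => by
    rw [List.findIdx?_cons, List.findIdx?_cons, h a (by simp),
      findIdx?_congr_mem p q l (fun x hx => h x (by simp [hx]))]

-- characterization of findIdx? on range n
lemma findIdx?_range_some (p : Nat → Bool) (n m : Nat) :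
    (List.range n).findIdx? p = some m ↔ m < n ∧ p m = true ∧ ∀ j < m, p j = false := by
  rw [List.findIdx?_eq_some_iff_getElem]
  constructor
  · rintro ⟨h, hp, hall⟩
    simp only [List.getElem_range] at hp hall
    exact ⟨by simpa using h, hp, fun j hj => by
      have := hall j (by simpa using hj); simpa using this⟩
  · rintro ⟨h, hp, hall⟩
    refine ⟨by simpa using h, by simpa using hp, fun j hj => ?_⟩
    simp only [List.getElem_range]
    simp [hall j hj]

lemma findIdx?_range_none (p : Nat → Bool) (n : Nat) :
    (List.range n).findIdx? p = none ↔ ∀ j < n, p j = false := by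
  rw [List.findIdx?_eq_none_iff]
  simp [List.mem_range]

-- membership in the cell list
lemma mem_bCells (grid : List (List (Option Int))) (n m : Nat) (rc : Nat × Nat) :
    rc ∈ bCells grid n m ↔
      rc.1 < n ∧ rc.2 < m ∧ (pvCell grid (rc.1 : Int) (rc.2 : Int)).isSome = true := by
  obtain ⟨r, c⟩ := rc
  simp only [bCells, List.mem_flatMap, List.mem_map, List.mem_filter, List.mem_range,
    Int.ofNat_eq_natCast]
  constructor
  · rintro ⟨a, ha, b, ⟨⟨hb, hocc⟩, heq⟩⟩
    cases heq
    exact ⟨ha, hb, hocc⟩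
  · rintro ⟨hr, hc, hocc⟩
    exact ⟨r, hr, c, ⟨⟨hc, hocc⟩, rfl⟩⟩

-- min side: first index satisfying p is the minimum of vals
lemma findIdx?_min_side (p : Nat → Bool) (n : Nat) (vals : List Nat)
    (hmem : ∀ x, x ∈ vals ↔ (x < n ∧ p x = true)) :
    ((List.range n).findIdx? p).getD n =
      (if vals.isEmpty then n else (PySem.List.min? vals (fun x => x)).getD 0) := by
  by_cases hv : vals = []
  · subst hv
    have : (List.range n).findIdx? p = none := by
      rw [findIdx?_range_none]
      intro j hj
      by_contra h
      have : j ∈ ([] : List Nat) := (hmem j).2 ⟨hj, by simpa using h⟩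
      simp at this
    simp [this]
  · cases hmin : PySem.List.min? vals (fun x => x) with
    | none => exact absurd ((PySem.List.min?_eq_none_iff vals _).1 hmin) hv
    | some mv =>
      have hm := (hmem mv).1 (PySem.List.min?_mem hmin)
      have hfind : (List.range n).findIdx? p = some mv := by
        rw [findIdx?_range_some]
        refine ⟨hm.1, hm.2, fun j hj => ?_⟩
        by_contra h
        have hjlt : j < n := lt_trans hj hm.1
        have hjm : j ∈ vals := (hmem j).2 ⟨hjlt, by simpa using h⟩
        have := PySem.List.min?_isMin hmin j hjm
        omega
      simp [hfind, hv, List.isEmpty_iff]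

-- max side: first index of the mirrored scan is n - 1 - max of vals
lemma findIdx?_max_side (p : Nat → Bool) (n : Nat) (vals : List Nat)
    (hmem : ∀ x, x ∈ vals ↔ (x < n ∧ p x = true)) :
    ((List.range n).findIdx? (fun i => p (n - 1 - i))).getD n =
      (if vals.isEmpty then n else n - 1 - (PySem.List.max? vals (fun x => x)).getD 0) := by
  by_cases hv : vals = []
  · subst hv
    have : (List.range n).findIdx? (fun i => p (n - 1 - i)) = none := by
      rw [findIdx?_range_none]
      intro j hj
      by_contra h
      have : (n - 1 - j) ∈ ([] : List Nat) := (hmem _).2 ⟨by omega, by simpa using h⟩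
      simp at this
    simp [this]
  · cases hmax : PySem.List.max? vals (fun x => x) with
    | none => exact absurd ((PySem.List.max?_eq_none_iff vals _).1 hmax) hv
    | some mv =>
      have hm := (hmem mv).1 (PySem.List.max?_mem hmax)
      have hfind : (List.range n).findIdx? (fun i => p (n - 1 - i)) = some (n - 1 - mv) := by
        rw [findIdx?_range_some]
        refine ⟨by omega, by simpa [show n - 1 - (n - 1 - mv) = mv by omega] using hm.2,
          fun j hj => ?_⟩
        by_contra h
        have hjm : (n - 1 - j) ∈ vals := (hmem _).2 ⟨by omega, by simpa using h⟩
        have := PySem.List.max?_isMax hmax _ hjm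
        simp only at this
        omega
      simp [hfind, hv, List.isEmpty_iff]

-- B's skip expression, per direction, read off the A-side first-occupied-line index
lemma rows_mem (grid : List (List (Option Int))) (x : Nat) :
    x ∈ (bCells grid grid.length (pvW grid)).map Prod.fst ↔
      (x < grid.length ∧ bRowOcc grid (x : Int) = true) := by
  simp only [List.mem_map, bRowOcc, List.any_eq_true, List.mem_range]
  constructor
  · rintro ⟨⟨r, c⟩, hm, rfl⟩
    have := (mem_bCells grid _ _ _).1 hm
    exact ⟨this.1, c, this.2.1, this.2.2⟩
  · rintro ⟨hx, c, hc, hocc⟩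
    exact ⟨(x, c), (mem_bCells grid _ _ _).2 ⟨hx, hc, hocc⟩, rfl⟩

lemma cols_mem (grid : List (List (Option Int))) (x : Nat) :
    x ∈ (bCells grid grid.length (pvW grid)).map Prod.snd ↔
      (x < pvW grid ∧ bColOcc grid (x : Int) = true) := by
  simp only [List.mem_map, bColOcc, List.any_eq_true, List.mem_range]
  constructor
  · rintro ⟨⟨r, c⟩, hm, rfl⟩
    have := (mem_bCells grid _ _ _).1 hm
    exact ⟨this.2.1, r, this.1, this.2.2⟩
  · rintro ⟨hx, r, hr, hocc⟩
    exact ⟨(r, x), (mem_bCells grid _ _ _).2 ⟨hr, hx, hocc⟩, rfl⟩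

lemma isEmpty_map_fst (grid : List (List (Option Int))) :
    (bCells grid grid.length (pvW grid)).isEmpty
      = ((bCells grid grid.length (pvW grid)).map Prod.fst).isEmpty := by
  simp

lemma isEmpty_map_snd (grid : List (List (Option Int))) :
    (bCells grid grid.length (pvW grid)).isEmpty
      = ((bCells grid grid.length (pvW grid)).map Prod.snd).isEmpty := by
  simp

lemma skipH_south (grid : List (List (Option Int))) :
    ((List.range grid.length).findIdx? (fun (i : Nat) => bRowOcc grid (i : Int))).getD grid.length
      = (if (bCells grid grid.length (pvW grid)).isEmpty then grid.length
         else (PySem.List.min? ((bCells grid grid.length (pvW grid)).map Prod.fst) (fun x => x)).getD 0) := by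
  rw [isEmpty_map_fst]
  exact findIdx?_min_side _ _ _ (rows_mem grid)

lemma skipH_north (grid : List (List (Option Int))) :
    ((List.range grid.length).findIdx?
        (fun (i : Nat) => bRowOcc grid ((grid.length : Int) - (i : Int) - 1))).getD grid.length
      = (if (bCells grid grid.length (pvW grid)).isEmpty then grid.length
         else grid.length - 1 - (PySem.List.max? ((bCells grid grid.length (pvW grid)).map Prod.fst) (fun x => x)).getD 0) := by
  rw [findIdx?_congr_mem _ (fun (i : Nat) => bRowOcc grid ((grid.length - 1 - i : Nat) : Int))
      _ (fun a ha => by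
        congr 1
        simp only [List.mem_range] at ha
        omega),
    isEmpty_map_fst]
  exact findIdx?_max_side _ _ _ (rows_mem grid)

lemma skipV_east (grid : List (List (Option Int))) :
    ((List.range (pvW grid)).findIdx? (fun (i : Nat) => bColOcc grid (i : Int))).getD (pvW grid)
      = (if (bCells grid grid.length (pvW grid)).isEmpty then pvW grid
         else (PySem.List.min? ((bCells grid grid.length (pvW grid)).map Prod.snd) (fun x => x)).getD 0) := by
  rw [isEmpty_map_snd]
  exact findIdx?_min_side _ _ _ (cols_mem grid)

lemma skipV_west (grid : List (List (Option Int))) :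
    ((List.range (pvW grid)).findIdx?
        (fun (i : Nat) => bColOcc grid ((pvW grid : Int) - (i : Int) - 1))).getD (pvW grid)
      = (if (bCells grid grid.length (pvW grid)).isEmpty then pvW grid
         else pvW grid - 1 - (PySem.List.max? ((bCells grid grid.length (pvW grid)).map Prod.snd) (fun x => x)).getD 0) := by
  rw [findIdx?_congr_mem _ (fun (i : Nat) => bColOcc grid ((pvW grid - 1 - i : Nat) : Int))
      _ (fun a ha => by
        congr 1
        simp only [List.mem_range] at ha
        omega),
    isEmpty_map_snd]
  exact findIdx?_max_side _ _ _ (cols_mem grid)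

lemma xor_parity (b : Bool) (n : Nat) :
    xor b (decide (n % 2 = 1)) = (b == decide (n % 2 = 0)) := by
  rcases Nat.mod_two_eq_zero_or_one n with h | h <;> cases b <;> simp [h]

-- ===== VERDICT =====

theorem boustrophedonMod_spec : Claim_equal_boustrophedonMod := by
  intro grid dir1 dir2 _ hpre
  unfold Spec_boustrophedonMod
  obtain ⟨hdirs, _, _⟩ := hpre
  rcases hdirs with ⟨h1 | h1, h2 | h2⟩ | ⟨h1 | h1, h2 | h2⟩ <;> subst h1 <;> subst h2 <;>
    simp only [boustrophedonMod, boustrophedonMod_alt, bValid, aLoopH_eq, aLoopV_eq,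
      List.length_range] <;>
    simp [skipH_south, skipH_north, skipV_east, skipV_west, xor_parity]
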